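-- pv_equiv track=rewrite | github.com/ejwillemse/mcarptif | solver/py_solution_builders.py | build_CARP_dead_cum_list
-- ===== SOURCE A (Python) =====
-- def build_CARP_dead_cum_list(route, d, depot, dumpcost):
--
--     temp_list_d = []
--     arc = route[0]
--     arc_pre = depot
--     total_dead = d[arc_pre][arc]
--     temp_list_d.append(total_dead)
--     for j in range(1,len(route)):
--         arc = route[j]
--         arc_pre = route[j-1]
--         total_dead += d[arc_pre][arc]
--         temp_list_d.append(total_dead)
--     arc_pre = route[-1]
--     arc = depot
--     total_dead += d[arc_pre][arc] + dumpcost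
--     temp_list_d.append(total_dead)
--     return(temp_list_d)
-- ===== SOURCE B (Python) =====
-- def build_CARP_dead_cum_list(route, d, depot, dumpcost):
--     n = len(route)
--     total = d[depot][route[0]] + d[route[n - 1]][depot] + dumpcost
--     for j in range(1, n):
--         total += d[route[j - 1]][route[j]]
--     res = [total]
--     total -= d[route[n - 1]][depot] + dumpcost
--     res.append(total)
--     for j in reversed(range(1, n)):
--         total -= d[route[j - 1]][route[j]]
--         res.append(total)
--     res.reverse()
--     return res
-- ===== Notes on version B (the rewrite author's own statement) =====
-- stated objective: alternative
-- what changed: B first computes the grand total of all deadhead costs in one pass, then builds the cumulative list BACK-TO-FRONT by peeling edge weights off the total (subtraction) and reversing at the end, instead of A's forward running-total accumulation.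
import Mathlib
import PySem

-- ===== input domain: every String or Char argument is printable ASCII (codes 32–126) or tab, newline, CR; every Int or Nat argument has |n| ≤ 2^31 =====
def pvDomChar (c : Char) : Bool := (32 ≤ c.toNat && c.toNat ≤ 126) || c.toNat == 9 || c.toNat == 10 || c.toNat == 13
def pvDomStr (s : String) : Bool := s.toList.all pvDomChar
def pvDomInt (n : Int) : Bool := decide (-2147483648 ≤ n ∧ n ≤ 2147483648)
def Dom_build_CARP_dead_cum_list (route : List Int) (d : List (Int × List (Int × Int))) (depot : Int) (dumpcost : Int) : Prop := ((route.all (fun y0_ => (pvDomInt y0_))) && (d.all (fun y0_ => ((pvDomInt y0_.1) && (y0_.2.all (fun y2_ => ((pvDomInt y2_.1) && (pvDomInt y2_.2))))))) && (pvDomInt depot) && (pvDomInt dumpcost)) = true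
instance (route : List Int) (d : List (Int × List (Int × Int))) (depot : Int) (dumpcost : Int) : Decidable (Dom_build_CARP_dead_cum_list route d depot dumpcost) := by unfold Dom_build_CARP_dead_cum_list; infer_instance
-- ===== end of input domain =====

-- B computes the grand total of all deadhead costs first, then builds the cumulative list
-- back-to-front by subtracting edge weights from the total and reversing at the end,
-- instead of A's forward running-total accumulation; objective: alternative.

-- d[x][y] for the nested dict (KeyError = none)
def pvLook (d : List (Int × List (Int × Int))) (x y : Int) : Option Int :=
  match (PySem.Dict.mk d).get? x with
  | none => none
  | some row => (PySem.Dict.mk row).get? y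

-- ===== PORT A =====
def build_CARP_dead_cum_list (route : List Int) (d : List (Int × List (Int × Int))) (depot : Int) (dumpcost : Int) : List Int :=
  -- arc = route[0]; arc_pre = depot; total_dead = d[arc_pre][arc]; temp_list_d.append(total_dead)
  let arc := (PySem.List.pyGet? route 0).getD 0
  let total0 := (pvLook d depot arc).getD 0
  -- for j in range(1, len(route)): running total, append
  let st := (PySem.List.pyRange 1 (route.length : Int) 1).foldl
      (fun (s : Int × List Int) j =>
        let arc := PySem.List.pyGetD route j 0
        let arc_pre := PySem.List.pyGetD route (j - 1) 0
        let t := s.1 + (pvLook d arc_pre arc).getD 0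
        (t, s.2 ++ [t]))
      (total0, [total0])
  -- arc_pre = route[-1]; total_dead += d[arc_pre][depot] + dumpcost
  let arc_pre := (PySem.List.pyGet? route (-1)).getD 0
  let t := st.1 + ((pvLook d arc_pre depot).getD 0 + dumpcost)
  st.2 ++ [t]

-- ===== PORT B =====
def build_CARP_dead_cum_list_alt (route : List Int) (d : List (Int × List (Int × Int))) (depot : Int) (dumpcost : Int) : List Int :=
  let n : Int := route.length
  -- total = d[depot][route[0]] + d[route[n-1]][depot] + dumpcost
  let total := (pvLook d depot ((PySem.List.pyGet? route 0).getD 0)).getD 0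
      + (pvLook d (PySem.List.pyGetD route (n - 1) 0) depot).getD 0 + dumpcost
  -- for j in range(1, n): total += d[route[j-1]][route[j]]
  let total := (PySem.List.pyRange 1 n 1).foldl
      (fun s j => s + (pvLook d (PySem.List.pyGetD route (j - 1) 0) (PySem.List.pyGetD route j 0)).getD 0) total
  let res := [total]
  let total := total - ((pvLook d (PySem.List.pyGetD route (n - 1) 0) depot).getD 0 + dumpcost)
  let res := res ++ [total]
  -- for j in reversed(range(1, n)): total -= d[route[j-1]][route[j]]; res.append(total)
  let st := (PySem.List.pyRange 1 n 1).reverse.foldl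
      (fun (s : Int × List Int) j =>
        let t := s.1 - (pvLook d (PySem.List.pyGetD route (j - 1) 0) (PySem.List.pyGetD route j 0)).getD 0
        (t, s.2 ++ [t])) (total, res)
  st.2.reverse

-- ===== PRECONDITION & SPEC =====
-- a labelled requirement: the string documents the condition, the Prop is the condition
abbrev pvCond (_label : String) (p : Prop) : Prop := p

-- Pre_ excludes exactly the inputs where the Python raises: the empty route (IndexError at
-- route[0] / KeyError at d[depot]) and a missing key in a lookup the route performs (KeyError).
def Pre_build_CARP_dead_cum_list (route : List Int) (d : List (Int × List (Int × Int))) (depot : Int) (dumpcost : Int) : Prop :=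
  pvCond "route is non-empty" (route ≠ []) ∧
  pvCond "depot legs are known" (∀ p ∈ [(depot, route.headD 0), (route.getLastD 0, depot)], pvLook d p.1 p.2 ≠ none) ∧
  pvCond "deadhead legs are known" (∀ p ∈ route.zip (route.drop 1), pvLook d p.1 p.2 ≠ none)
instance (route : List Int) (d : List (Int × List (Int × Int))) (depot : Int) (dumpcost : Int) : Decidable (Pre_build_CARP_dead_cum_list route d depot dumpcost) := by unfold Pre_build_CARP_dead_cum_list; infer_instance

def pvWitness_build_CARP_dead_cum_list : List Int × (List (Int × List (Int × Int))) × Int × Int :=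
  ([1, 2, 3],
   [(0, [(0, 1), (1, 3), (2, 4), (3, 2)]),
    (1, [(0, 6), (1, 1), (2, 5), (3, 2)]),
    (2, [(0, 7), (1, 2), (2, 1), (3, 3)]),
    (3, [(0, 4), (1, 5), (2, 2), (3, 1)])], 0, 10)

def Spec_build_CARP_dead_cum_list (route : List Int) (d : List (Int × List (Int × Int))) (depot : Int) (dumpcost : Int) (out : List Int) : Prop := out = build_CARP_dead_cum_list_alt route d depot dumpcost
instance (route : List Int) (d : List (Int × List (Int × Int))) (depot : Int) (dumpcost : Int) (out : List Int) : Decidable (Spec_build_CARP_dead_cum_list route d depot dumpcost out) := by unfold Spec_build_CARP_dead_cum_list; infer_instance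

-- ===== CLAIM (what is proved, stated in full; the proofs are below) =====
def Claim_equal_build_CARP_dead_cum_list : Prop := ∀ (route : List Int) (d : List (Int × List (Int × Int))) (depot : Int) (dumpcost : Int), Dom_build_CARP_dead_cum_list route d depot dumpcost → Pre_build_CARP_dead_cum_list route d depot dumpcost → Spec_build_CARP_dead_cum_list route d depot dumpcost (build_CARP_dead_cum_list route d depot dumpcost)

-- ===== LEMMAS AND PROOFS =====

-- forward prefix sums (characterises A's running-total loop)
def pvAccum (acc : Int) : List Int → List Int
  | [] => []
  | w :: ws => (acc + w) :: pvAccum (acc + w) ws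

-- backward peeling (characterises B's subtraction loop)
def pvSub (t : Int) : List Int → List Int
  | [] => []
  | w :: ws => (t - w) :: pvSub (t - w) ws

-- A's running-total/append fold IS a prefix-sum pass
lemma foldl_accum (ws : List Int) (t : Int) (l : List Int) :
    ws.foldl (fun (s : Int × List Int) w => (s.1 + w, s.2 ++ [s.1 + w])) (t, l)
      = (t + ws.sum, l ++ pvAccum t ws) := by
  induction ws generalizing t l with
  | nil => simp [pvAccum]
  | cons w ws ih => simp [List.foldl_cons, pvAccum, ih, add_assoc]

-- B's subtraction/append fold peels weights off the total
lemma foldl_sub (ws : List Int) (t : Int) (l : List Int) :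
    ws.foldl (fun (s : Int × List Int) w => (s.1 - w, s.2 ++ [s.1 - w])) (t, l)
      = (t - ws.sum, l ++ pvSub t ws) := by
  induction ws generalizing t l with
  | nil => simp [pvSub]
  | cons w ws ih => simp [List.foldl_cons, pvSub, ih, sub_sub]

lemma pvSub_append_singleton (ws : List Int) (t w : Int) :
    pvSub t (ws ++ [w]) = pvSub t ws ++ [t - ws.sum - w] := by
  induction ws generalizing t with
  | nil => simp [pvSub]
  | cons x xs ih => simp [pvSub, ih, sub_sub]

-- reversing the peeled list gives the forward prefix sums
lemma pvSub_reverse (ws : List Int) (t : Int) :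
    (pvSub t ws.reverse).reverse ++ [t] = (t - ws.sum) :: pvAccum (t - ws.sum) ws := by
  induction ws generalizing t with
  | nil => simp [pvSub, pvAccum]
  | cons w rest ih =>
    have e1 : t - (w :: rest).sum = t - rest.sum - w := by simp [List.sum_cons]; ring
    have e2 : t - rest.sum - w + w = t - rest.sum := by ring
    rw [List.reverse_cons, pvSub_append_singleton, List.sum_reverse, List.reverse_append,
        e1, pvAccum, e2]
    simp only [List.reverse_cons, List.reverse_nil, List.nil_append, List.cons_append]
    exact congrArg (List.cons _) (ih t)

-- A's index walk j = 1 .. len-1 over (route[j-1], route[j]) is the zip of route with its tail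
lemma map_pairs_pyRange (xs : List Int) :
    (PySem.List.pyRange 1 (xs.length : Int) 1).map
        (fun j => (PySem.List.pyGetD xs (j - 1) 0, PySem.List.pyGetD xs j 0))
      = xs.zip (xs.drop 1) := by
  apply List.ext_getElem
  · simp [PySem.List.length_pyRange_one]
  · intro k h1 h2
    have hlen : k < (PySem.List.pyRange 1 (xs.length : Int) 1).length := by
      simpa using h1
    have hk : k + 1 < xs.length := by
      simp [PySem.List.length_pyRange_one] at hlen
      omega
    rw [List.getElem_map, PySem.List.getElem_pyRange_one 1 _ k hlen]
    have h1' : (1 : Int) + k - 1 = ((k : Nat) : Int) := by ring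
    have h2' : (1 : Int) + k = (((k + 1 : Nat)) : Int) := by push_cast; ring
    rw [h1', h2', PySem.List.pyGetD_natCast, PySem.List.pyGetD_natCast, List.getElem_zip]
    have hk0 : k < xs.length := by omega
    simp [hk0, hk]

-- route[-1] (A) and route[len(route)-1] (B) pick the same node
lemma last_node_eq (xs : List Int) :
    (PySem.List.pyGet? xs (-1)).getD 0 = PySem.List.pyGetD xs ((xs.length : Int) - 1) 0 := by
  cases xs with
  | nil => simp [PySem.List.pyGet?, PySem.List.pyGetD, PySem.List.pyIdx?]
  | cons x rest =>
    rw [PySem.List.pyGet?_neg_one]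
    have h : ((x :: rest).length : Int) - 1 = (((x :: rest).length - 1 : Nat) : Int) := by
      simp
    rw [h, PySem.List.pyGetD_natCast]
    simp [List.getLast?_eq_getElem?, List.getD]

theorem build_CARP_dead_cum_list_eq (route : List Int) (d : List (Int × List (Int × Int))) (depot : Int) (dumpcost : Int) :
    build_CARP_dead_cum_list route d depot dumpcost = build_CARP_dead_cum_list_alt route d depot dumpcost := by
  simp only [build_CARP_dead_cum_list, build_CARP_dead_cum_list_alt, last_node_eq]
  set w0 := (pvLook d depot ((PySem.List.pyGet? route 0).getD 0)).getD 0 with hw0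
  set wl := (pvLook d (PySem.List.pyGetD route ((route.length : Int) - 1) 0) depot).getD 0 with hwl
  set mids := (route.zip (route.drop 1)).map (fun p : Int × Int => (pvLook d p.1 p.2).getD 0) with hmids
  -- A's loop
  have hA : List.foldl (fun (s : Int × List Int) (j : Int) =>
        (s.1 + (pvLook d (PySem.List.pyGetD route (j - 1) 0) (PySem.List.pyGetD route j 0)).getD 0,
         s.2 ++ [s.1 + (pvLook d (PySem.List.pyGetD route (j - 1) 0) (PySem.List.pyGetD route j 0)).getD 0]))
        (w0, [w0]) (PySem.List.pyRange 1 (route.length : Int) 1)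
      = (w0 + mids.sum, [w0] ++ pvAccum w0 mids) := by
    rw [← foldl_accum mids w0 [w0], hmids, ← map_pairs_pyRange route, List.map_map, List.foldl_map]
    rfl
  -- B's first loop (total)
  have hmm : (PySem.List.pyRange 1 (route.length : Int) 1).map
      (fun j => (pvLook d (PySem.List.pyGetD route (j - 1) 0) (PySem.List.pyGetD route j 0)).getD 0)
      = mids := by
    rw [hmids, ← map_pairs_pyRange route, List.map_map]
    rfl
  have hT : List.foldl (fun (s : Int) (j : Int) =>
        s + (pvLook d (PySem.List.pyGetD route (j - 1) 0) (PySem.List.pyGetD route j 0)).getD 0)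
        (w0 + wl + dumpcost) (PySem.List.pyRange 1 (route.length : Int) 1)
      = w0 + wl + dumpcost + mids.sum := by
    rw [PySem.List.foldl_add, hmm]
  -- B's second loop (peeling)
  have hB : List.foldl (fun (s : Int × List Int) (j : Int) =>
        (s.1 - (pvLook d (PySem.List.pyGetD route (j - 1) 0) (PySem.List.pyGetD route j 0)).getD 0,
         s.2 ++ [s.1 - (pvLook d (PySem.List.pyGetD route (j - 1) 0) (PySem.List.pyGetD route j 0)).getD 0]))
        (w0 + mids.sum, [w0 + wl + dumpcost + mids.sum] ++ [w0 + mids.sum])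
        (PySem.List.pyRange 1 (route.length : Int) 1).reverse
      = (w0 + mids.sum - mids.reverse.sum,
         ([w0 + wl + dumpcost + mids.sum] ++ [w0 + mids.sum]) ++ pvSub (w0 + mids.sum) mids.reverse) := by
    rw [← foldl_sub mids.reverse (w0 + mids.sum) _, ← hmm, ← List.map_reverse, List.foldl_map]
  simp only [hA, hT]
  have hT2 : w0 + wl + dumpcost + mids.sum - (wl + dumpcost) = w0 + mids.sum := by ring
  rw [hT2, hB]
  have key := pvSub_reverse mids (w0 + mids.sum)
  rw [show w0 + mids.sum - mids.sum = w0 from by ring] at key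
  rw [List.reverse_append, List.reverse_append, List.reverse_singleton, List.reverse_singleton,
      ← List.append_assoc, key]
  have hlast : w0 + mids.sum + (wl + dumpcost) = w0 + wl + dumpcost + mids.sum := by ring
  rw [hlast]
  simp

-- ===== VERDICT (by name: the statement is the Claim_ definition above) =====
theorem build_CARP_dead_cum_list_spec : Claim_equal_build_CARP_dead_cum_list := by
  intro route d depot dumpcost _ _
  exact build_CARP_dead_cum_list_eq route d depot dumpcost
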